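-- pv_equiv track=rewrite | github.com/LCL121/image-processing-task1 | utils/grayCode.py | __encode28
-- ===== SOURCE A (Python) =====
-- def __encode28(pixel):
--     """
--     将每一个像素点转化为格雷码
--     :param pixel: 像素
--     :return: list 8 位格雷码
--     """
--     bin_pixel = bin(pixel)
--     # 转成8位二进制
--     bin_pixel = ('00000000' + bin_pixel[2:])[-8:]
--     result = []
--     for idx in range(len(bin_pixel) - 1, -1, -1):
--         if idx != 0:
--             temp = 1
--             if bin_pixel[idx] == bin_pixel[idx - 1]:
--                 temp = 0
--             result.insert(0, temp)
--         else:
--             result.insert(0, int(bin_pixel[0]))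
--     return result
-- ===== SOURCE B (Python) =====
-- def __encode28(pixel):
--     """
--     将每一个像素点转化为格雷码
--     :param pixel: 像素
--     :return: list 8 位格雷码
--     """
--     p = pixel & 0xFF
--     g = p ^ (p >> 1)
--     return [(g >> k) & 1 for k in range(7, -1, -1)]
-- ===== Notes on version B (the rewrite author's own statement) =====
-- stated objective: idiomatic
-- what changed: Replaces A's bin()-string padding/slicing and adjacent-character-comparison loop with the closed-form integer Gray code g = (pixel & 0xFF) ^ ((pixel & 0xFF) >> 1) and a single MSB-first bit-extraction comprehension.
-- outside the precondition, e.g. on __encode28(-5): A returns [0, 0, 0, 0, 1, 1, 1, 1], B returns [1, 0, 0, 0, 0, 1, 1, 0]; on __encode28(-64): A raises ValueError, B returns [1, 0, 1, 0, 0, 0, 0, 0]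
import Mathlib
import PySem

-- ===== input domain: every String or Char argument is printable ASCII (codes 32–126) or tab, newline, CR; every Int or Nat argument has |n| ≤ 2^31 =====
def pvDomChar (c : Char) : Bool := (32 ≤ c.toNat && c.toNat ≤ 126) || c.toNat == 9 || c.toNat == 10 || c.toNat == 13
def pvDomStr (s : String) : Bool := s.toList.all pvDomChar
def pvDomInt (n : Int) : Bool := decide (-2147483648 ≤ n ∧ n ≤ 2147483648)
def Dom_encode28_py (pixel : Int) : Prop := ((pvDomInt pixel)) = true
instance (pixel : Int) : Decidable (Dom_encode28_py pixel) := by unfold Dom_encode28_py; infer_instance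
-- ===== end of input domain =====

-- B replaces A's bin()-string padding/slicing and adjacent-character loop with the
-- closed-form integer Gray code (p ^ (p >> 1)) and a bit-extraction pass (idiomatic).

-- ===== PORT A =====
-- bin(n) digit part for n ≥ 0: Python's binary digit string, most significant first
def pvBits (n : Nat) : List Char :=
  if _h : n < 2 then [Nat.digitChar n]
  else pvBits (n / 2) ++ [Nat.digitChar (n % 2)]
decreasing_by exact Nat.div_lt_self (by omega) (by omega)

-- the for-loop of A over the 8-character string (result built with insert(0, ·))
def pvLoop (s : List Char) : List Int :=
  (PySem.List.pyRange ((s.length : Int) - 1) (-1) (-1)).foldl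
    (fun result idx =>
      if idx ≠ 0 then
        PySem.List.insert result 0
          (if PySem.List.pyGetD s idx ' ' = PySem.List.pyGetD s (idx - 1) ' ' then 0 else 1)
      else
        -- int(bin_pixel[0]): ValueError (A raises) when the char is not int-parsable;
        -- that happens only outside Pre_, where nothing is claimed
        PySem.List.insert result 0
          ((PySem.Int.ofStr? (String.mk [PySem.List.pyGetD s 0 ' '])).getD 0))
    []

def encode28_py (pixel : Int) : List Int :=
  -- bin(pixel) as a char list: sign, then "0b", then the digits of |pixel|
  let binPixel : List Char :=
    (if pixel < 0 then ['-', '0', 'b'] else ['0', 'b']) ++ pvBits pixel.natAbs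
  let padded := List.replicate 8 '0' ++ binPixel.drop 2   -- '00000000' + bin_pixel[2:]
  pvLoop (PySem.List.slice padded (some (-8)) none)        -- [-8:]

-- ===== PORT B =====
def encode28_py_alt (pixel : Int) : List Int :=
  let p := PySem.Int.mod pixel 256          -- pixel & 0xFF (exact: masking by 0xFF is mod 256)
  let g := p.toNat ^^^ (p.toNat >>> 1)      -- p ^ (p >> 1); p ∈ [0, 256) so toNat is exact
  (PySem.List.pyRange 7 (-1) (-1)).map (fun k => (((g >>> k.toNat) &&& 1 : Nat) : Int))

-- ===== PRECONDITION & SPEC =====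
-- Pre_ restricts to the function's natural pixel domain, pixel ≥ 0: on negative pixels A
-- raises ValueError (pixel in [-127,-64]) or returns an artifact of slicing the sign
-- character of bin(pixel), which is not the Gray code of any byte.
def Pre_encode28_py (pixel : Int) : Prop := 0 ≤ pixel
instance (pixel : Int) : Decidable (Pre_encode28_py pixel) := by unfold Pre_encode28_py; infer_instance
def pvWitness_encode28_py : Int := (5)

def Spec_encode28_py (pixel : Int) (out : List Int) : Prop := out = encode28_py_alt pixel
instance (pixel : Int) (out : List Int) : Decidable (Spec_encode28_py pixel out) := by unfold Spec_encode28_py; infer_instance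

-- ===== CLAIM (what is proved, stated in full; the proofs are below) =====
def Claim_equal_encode28_py : Prop := ∀ (pixel : Int), Dom_encode28_py pixel → Pre_encode28_py pixel → Spec_encode28_py pixel (encode28_py pixel)

-- ===== LEMMAS AND PROOFS =====

-- the last-8 window of the padded digit string, as explicit bit characters of n
def pvG (n : Nat) : List Char :=
  [Nat.digitChar (n / 128 % 2), Nat.digitChar (n / 64 % 2), Nat.digitChar (n / 32 % 2),
   Nat.digitChar (n / 16 % 2), Nat.digitChar (n / 8 % 2), Nat.digitChar (n / 4 % 2),
   Nat.digitChar (n / 2 % 2), Nat.digitChar (n % 2)]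

theorem pad_drop (n : Nat) :
    (List.replicate 8 '0' ++ pvBits n).drop ((List.replicate 8 '0' ++ pvBits n).length - 8)
      = pvG n := by
  induction n using Nat.strong_induction_on with
  | _ n ih =>
    by_cases h2 : n < 2
    · interval_cases n <;> (rw [pvBits]; rfl)
    · have hb : pvBits n = pvBits (n / 2) ++ [Nat.digitChar (n % 2)] := by
        rw [pvBits]; simp [h2]
      set s' := List.replicate 8 '0' ++ pvBits (n / 2) with hs'
      have hlen : 8 ≤ s'.length := by
        simp [hs']
      have hih := ih (n / 2) (Nat.div_lt_self (by omega) (by omega))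
      rw [hb, show List.replicate 8 '0' ++ (pvBits (n / 2) ++ [Nat.digitChar (n % 2)])
            = s' ++ [Nat.digitChar (n % 2)] by simp [hs']]
      have hL : (s' ++ [Nat.digitChar (n % 2)]).length - 8 = (s'.length - 8) + 1 := by
        simp only [List.length_append, List.length_cons, List.length_nil]; omega
      rw [hL, List.drop_append_of_le_length (by omega)]
      have htail : s'.drop (s'.length - 8 + 1) = (s'.drop (s'.length - 8)).tail := by
        rw [List.tail_drop]
      rw [htail, hih]
      -- pvG n = tail (pvG (n/2)) ++ [digitChar (n % 2)], componentwise by omega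
      have e1 : n / 2 / 64 = n / 128 := by omega
      have e2 : n / 2 / 32 = n / 64 := by omega
      have e3 : n / 2 / 16 = n / 32 := by omega
      have e4 : n / 2 / 8 = n / 16 := by omega
      have e5 : n / 2 / 4 = n / 8 := by omega
      have e6 : n / 2 / 2 = n / 4 := by omega
      simp [pvG, e1, e2, e3, e4, e5, e6]

theorem pvG_mod (n : Nat) : pvG n = pvG (n % 256) := by
  unfold pvG
  have e1 : n % 256 / 128 % 2 = n / 128 % 2 := by omega
  have e2 : n % 256 / 64 % 2 = n / 64 % 2 := by omega
  have e3 : n % 256 / 32 % 2 = n / 32 % 2 := by omega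
  have e4 : n % 256 / 16 % 2 = n / 16 % 2 := by omega
  have e5 : n % 256 / 8 % 2 = n / 8 % 2 := by omega
  have e6 : n % 256 / 4 % 2 = n / 4 % 2 := by omega
  have e7 : n % 256 / 2 % 2 = n / 2 % 2 := by omega
  have e8 : n % 256 % 2 = n % 2 := by omega
  rw [e1, e2, e3, e4, e5, e6, e7, e8]

def pvAlt (t : Nat) : List Int :=
  (PySem.List.pyRange 7 (-1) (-1)).map (fun k => (((t ^^^ (t >>> 1)) >>> k.toNat) &&& 1 : Nat))

set_option maxRecDepth 10000 in
theorem key : ∀ m : Fin 256, pvLoop (pvG m.val) = pvAlt m.val := by decide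

-- ===== VERDICT (by name: the statement is the Claim_ definition above) =====
theorem encode28_py_spec : Claim_equal_encode28_py := by
  intro pixel _ hpre
  unfold Pre_encode28_py at hpre
  unfold Spec_encode28_py encode28_py encode28_py_alt
  have hneg : ¬ pixel < 0 := by omega
  simp only [hneg, if_false]
  have hdrop : (['0', 'b'] ++ pvBits pixel.natAbs).drop 2 = pvBits pixel.natAbs := by simp
  rw [hdrop]
  rw [PySem.List.slice_from_neg_ofNat _ 8 (by omega)]
  rw [pad_drop, pvG_mod]
  have hmod : (PySem.Int.mod pixel 256).toNat = pixel.natAbs % 256 := by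
    simp [PySem.Int.mod, Int.fmod_eq_emod]; omega
  rw [hmod]
  exact key ⟨pixel.natAbs % 256, by omega⟩
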